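-- pv_equiv track=rewrite | github.com/Davinchi1352/bukoai | app/routes/api.py | replace_chapter_in_book_content
-- ===== SOURCE A (Python) =====
-- def replace_chapter_in_book_content(book_content, chapter_title, new_content):
--     """
--     Reemplaza un capítulo específico en el contenido completo del libro.
--     """
--     lines = book_content.split('\n')
--     new_lines = []
--     in_target_chapter = False
--     chapter_found = False
--
--     for line in lines:
--         # Detectar el inicio del capítulo objetivo
--         if line.strip().startswith('##') and chapter_title.lower() in line.lower():
--             in_target_chapter = True
--             chapter_found = True
--             # Agregar el nuevo contenido completo
--             new_lines.extend(new_content.split('\n'))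
--             continue
--
--         # Detectar el inicio del siguiente capítulo (salir del capítulo objetivo)
--         if in_target_chapter and line.strip().startswith('##') and chapter_title.lower() not in line.lower():
--             in_target_chapter = False
--
--         # Si no estamos en el capítulo objetivo, mantener la línea original
--         if not in_target_chapter:
--             new_lines.append(line)
--
--     # Si no se encontró el capítulo, agregar el nuevo contenido al final
--     if not chapter_found:
--         new_lines.extend(['', new_content])
--
--     return '\n'.join(new_lines)
-- ===== SOURCE B (Python) =====
-- def replace_chapter_in_book_content(book_content, chapter_title, new_content):
--     """
--     Reemplaza un capitulo especifico en el contenido completo del libro.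
--     Section-based rewrite: split into preamble + '##'-headed sections and
--     rebuild, swapping each matching section for the new content.
--     """
--     lines = book_content.split('\n')
--     title = chapter_title.lower()
--
--     def is_header(line):
--         return line.strip().startswith('##')
--
--     k = 0
--     while k < len(lines) and not is_header(lines[k]):
--         k += 1
--     out = lines[:k]                      # preamble, kept as-is
--     found = False
--     while k < len(lines):                # lines[k] is a header
--         j = k + 1
--         while j < len(lines) and not is_header(lines[j]):
--             j += 1
--         if title in lines[k].lower():
--             found = True
--             out.extend(new_content.split('\n'))
--         else:
--             out.extend(lines[k:j])
--         k = j
--     if not found: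
--         out.extend(['', new_content])
--     return '\n'.join(out)
-- ===== Notes on version B (the rewrite author's own statement) =====
-- stated objective: alternative
-- what changed: Replaces A's line-by-line state machine (in_target/found flags carried across the loop) by a section decomposition: split the lines into a preamble plus '##'-headed sections, keep the preamble, and emit each section either unchanged or as the new content depending on its header.
import Mathlib
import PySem

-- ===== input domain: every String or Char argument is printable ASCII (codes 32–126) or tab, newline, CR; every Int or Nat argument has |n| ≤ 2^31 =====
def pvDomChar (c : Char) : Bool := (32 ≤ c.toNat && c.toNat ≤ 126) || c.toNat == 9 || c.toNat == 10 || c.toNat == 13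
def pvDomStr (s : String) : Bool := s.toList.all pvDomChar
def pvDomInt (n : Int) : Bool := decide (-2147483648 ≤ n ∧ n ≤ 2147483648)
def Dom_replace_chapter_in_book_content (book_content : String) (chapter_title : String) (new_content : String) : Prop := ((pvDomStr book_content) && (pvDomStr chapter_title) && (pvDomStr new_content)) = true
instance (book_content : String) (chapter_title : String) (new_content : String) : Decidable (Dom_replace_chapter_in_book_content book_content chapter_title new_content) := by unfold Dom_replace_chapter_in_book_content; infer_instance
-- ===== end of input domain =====

-- B rebuilds the book as preamble + '##'-headed sections (swapping matching sections wholesale)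
-- instead of A's line-by-line state machine; objective: alternative decomposition, same cost.

-- ===== PORT A =====
-- one fold step of A's loop; state = (new_lines, in_target_chapter, chapter_found)
def pvAStep (tl : List Char) (nls : List (List Char))
    (st : List (List Char) × Bool × Bool) (line : List Char) :
    List (List Char) × Bool × Bool :=
  let (new_lines, in_t, found) := st
  if PySem.Chars.startswith (PySem.Chars.strip line) ['#', '#'] &&
      PySem.Chars.isIn tl (PySem.Chars.lower line) then
    (new_lines ++ nls, true, true)
  else
    let in_t :=
      if in_t && PySem.Chars.startswith (PySem.Chars.strip line) ['#', '#'] &&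
          !PySem.Chars.isIn tl (PySem.Chars.lower line) then false else in_t
    if !in_t then (new_lines ++ [line], in_t, found) else (new_lines, in_t, found)

def replace_chapter_in_book_content (book_content : String) (chapter_title : String) (new_content : String) : String :=
  let lines := PySem.Chars.splitOn book_content.toList ['\n']
  let tl := PySem.Chars.lower chapter_title.toList
  let nls := PySem.Chars.splitOn new_content.toList ['\n']
  let r := lines.foldl (pvAStep tl nls) ([], false, false)
  let new_lines := if !r.2.2 then r.1 ++ [[], new_content.toList] else r.1
  String.mk (PySem.Chars.join ['\n'] new_lines)

-- ===== PORT B =====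
def pvIsHeader (line : List Char) : Bool :=
  PySem.Chars.startswith (PySem.Chars.strip line) ['#', '#']

-- process the section list (first line, if any, is a header); returns (output lines, found)
def pvBLoop (tl : List Char) (nls : List (List Char)) : List (List Char) → List (List Char) × Bool
  | [] => ([], false)
  | h :: rest =>
      let body := rest.takeWhile (fun l => !pvIsHeader l)
      let rest' := rest.dropWhile (fun l => !pvIsHeader l)
      let r := pvBLoop tl nls rest'
      if PySem.Chars.isIn tl (PySem.Chars.lower h) then (nls ++ r.1, true)
      else ((h :: body) ++ r.1, r.2)
  termination_by l => l.length
  decreasing_by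
    simpa using Nat.lt_succ_of_le (List.dropWhile_sublist _).length_le

def replace_chapter_in_book_content_alt (book_content : String) (chapter_title : String) (new_content : String) : String :=
  let lines := PySem.Chars.splitOn book_content.toList ['\n']
  let tl := PySem.Chars.lower chapter_title.toList
  let nls := PySem.Chars.splitOn new_content.toList ['\n']
  let pre := lines.takeWhile (fun l => !pvIsHeader l)
  let rest := lines.dropWhile (fun l => !pvIsHeader l)
  let r := pvBLoop tl nls rest
  let out := pre ++ r.1
  let out := if !r.2 then out ++ [[], new_content.toList] else out
  String.mk (PySem.Chars.join ['\n'] out)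

-- ===== PRECONDITION & SPEC =====
def Spec_replace_chapter_in_book_content (book_content : String) (chapter_title : String) (new_content : String) (out : String) : Prop := out = replace_chapter_in_book_content_alt book_content chapter_title new_content
instance (book_content : String) (chapter_title : String) (new_content : String) (out : String) : Decidable (Spec_replace_chapter_in_book_content book_content chapter_title new_content out) := by unfold Spec_replace_chapter_in_book_content; infer_instance

-- ===== CLAIM (what is proved, stated in full; the proofs are below) =====
def Claim_equal_replace_chapter_in_book_content : Prop := ∀ (book_content : String) (chapter_title : String) (new_content : String), Dom_replace_chapter_in_book_content book_content chapter_title new_content → Spec_replace_chapter_in_book_content book_content chapter_title new_content (replace_chapter_in_book_content book_content chapter_title new_content)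

-- ===== LEMMAS AND PROOFS =====

-- A's step on a non-header line with in_target = false: the line is appended.
theorem pvAStep_nonheader_false (tl : List Char) (nls : List (List Char))
    (acc : List (List Char)) (f : Bool) (line : List Char) (h : pvIsHeader line = false) :
    pvAStep tl nls (acc, false, f) line = (acc ++ [line], false, f) := by
  simp [pvAStep, pvIsHeader] at h ⊢
  simp [h]

-- A's step on a non-header line with in_target = true: the line is skipped.
theorem pvAStep_nonheader_true (tl : List Char) (nls : List (List Char))
    (acc : List (List Char)) (f : Bool) (line : List Char) (h : pvIsHeader line = false) :
    pvAStep tl nls (acc, true, f) line = (acc, true, f) := by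
  simp [pvAStep, pvIsHeader] at h ⊢
  simp [h]

-- On a header line, A's step does not depend on the incoming in_target flag.
theorem pvAStep_header_flag (tl : List Char) (nls : List (List Char))
    (acc : List (List Char)) (f : Bool) (line : List Char) (h : pvIsHeader line = true) :
    pvAStep tl nls (acc, true, f) line = pvAStep tl nls (acc, false, f) line := by
  simp [pvAStep, pvIsHeader] at h ⊢
  by_cases hm : PySem.Chars.isIn tl (PySem.Chars.lower line) = true <;> simp [h, hm]

-- Folding A's step over non-header lines with in_target = false appends them all.
theorem pvFold_nonheader_false (tl : List Char) (nls : List (List Char))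
    (ls : List (List Char)) (hls : ∀ l ∈ ls, pvIsHeader l = false) :
    ∀ (acc : List (List Char)) (f : Bool),
      ls.foldl (pvAStep tl nls) (acc, false, f) = (acc ++ ls, false, f) := by
  induction ls with
  | nil => simp
  | cons x xs ih =>
      intro acc f
      have hx := hls x (by simp)
      rw [List.foldl_cons, pvAStep_nonheader_false tl nls acc f x hx,
        ih (fun l hl => hls l (by simp [hl]))]
      simp

-- Folding A's step over non-header lines with in_target = true skips them all.
theorem pvFold_nonheader_true (tl : List Char) (nls : List (List Char))
    (ls : List (List Char)) (hls : ∀ l ∈ ls, pvIsHeader l = false) :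
    ∀ (acc : List (List Char)) (f : Bool),
      ls.foldl (pvAStep tl nls) (acc, true, f) = (acc, true, f) := by
  induction ls with
  | nil => simp
  | cons x xs ih =>
      intro acc f
      rw [List.foldl_cons, pvAStep_nonheader_true tl nls acc f x (hls x (by simp)),
        ih (fun l hl => hls l (by simp [hl]))]

-- head of a dropWhile-remainder is a header
theorem pvHead_dropWhile (ls : List (List Char)) (hd : List Char) (t : List (List Char))
    (he : ls.dropWhile (fun l => !pvIsHeader l) = hd :: t) : pvIsHeader hd = true := by
  have := List.head_dropWhile_not (p := fun l => !pvIsHeader l) (l := ls)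
    (by simp [he])
  simpa [he] using this

-- Main loop correspondence: folding A's step over a section list (head is a header)
-- reproduces pvBLoop's output and found flag, for either incoming in_target flag.
theorem pvFold_sections (tl : List Char) (nls : List (List Char)) :
    ∀ (n : Nat) (rest : List (List Char)), rest.length ≤ n →
      (rest = [] ∨ ∃ hd t, rest = hd :: t ∧ pvIsHeader hd = true) →
      ∀ (acc : List (List Char)) (b f : Bool),
        ((rest.foldl (pvAStep tl nls) (acc, b, f)).1 =
            acc ++ (pvBLoop tl nls rest).1) ∧
        ((rest.foldl (pvAStep tl nls) (acc, b, f)).2.2 =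
            (f || (pvBLoop tl nls rest).2)) := by
  intro n
  induction n with
  | zero =>
      intro rest hn hshape acc b f
      have : rest = [] := List.length_eq_zero_iff.mp (Nat.le_zero.mp hn)
      subst this
      simp [pvBLoop]
  | succ n ih =>
      intro rest hn hshape acc b f
      rcases hshape with hnil | ⟨hd, t, rfl, hhd⟩
      · subst hnil; simp [pvBLoop]
      · -- first, the step on the header hd is flag-independent
        have hstep : ∀ b : Bool, pvAStep tl nls (acc, b, f) hd =
            pvAStep tl nls (acc, false, f) hd := by
          intro b; cases b
          · rfl
          · exact pvAStep_header_flag tl nls acc f hd hhd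
        rw [List.foldl_cons, hstep b]
        set body := t.takeWhile (fun l => !pvIsHeader l) with hbody
        set rest' := t.dropWhile (fun l => !pvIsHeader l) with hrest'
        have ht : t = body ++ rest' := (List.takeWhile_append_dropWhile).symm
        have hbodyall : ∀ l ∈ body, pvIsHeader l = false := by
          intro l hl
          have := List.mem_takeWhile_imp hl
          simpa using this
        have hlen' : rest'.length ≤ n := by
          have h1 : rest'.length ≤ t.length := (List.dropWhile_sublist _).length_le
          simp at hn; omega
        have hshape' : rest' = [] ∨ ∃ hd' t', rest' = hd' :: t' ∧ pvIsHeader hd' = true := by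
          cases hr : rest' with
          | nil => exact Or.inl rfl
          | cons hd' t' => exact Or.inr ⟨hd', t', rfl, pvHead_dropWhile t hd' t' hr⟩
        by_cases hm : PySem.Chars.isIn tl (PySem.Chars.lower hd) = true
        · -- matching header: emit nls, skip the body, recurse on rest'
          have hstep1 : pvAStep tl nls (acc, false, f) hd = (acc ++ nls, true, true) := by
            simp [pvAStep, pvIsHeader] at hhd ⊢
            simp [hhd, hm]
          have hts : List.foldl (pvAStep tl nls) (acc ++ nls, true, true) t
              = List.foldl (pvAStep tl nls) (acc ++ nls, true, true) rest' := by
            conv_lhs => rw [ht]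
            rw [List.foldl_append,
              pvFold_nonheader_true tl nls body hbodyall (acc ++ nls) true]
          rw [hstep1, hts]
          have hIH := ih rest' hlen' hshape' (acc ++ nls) true true
          constructor
          · rw [hIH.1]
            simp [pvBLoop, ← hrest', hm]
          · rw [hIH.2]
            simp [pvBLoop, ← hrest', hm]
        · -- non-matching header: keep the line, keep the body, recurse on rest'
          have hstep1 : pvAStep tl nls (acc, false, f) hd = (acc ++ [hd], false, f) := by
            simp [pvAStep, pvIsHeader] at hhd ⊢
            simp [hhd, hm]
          have hts : List.foldl (pvAStep tl nls) (acc ++ [hd], false, f) t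
              = List.foldl (pvAStep tl nls) (acc ++ [hd] ++ body, false, f) rest' := by
            conv_lhs => rw [ht]
            rw [List.foldl_append,
              pvFold_nonheader_false tl nls body hbodyall (acc ++ [hd]) f]
          rw [hstep1, hts]
          have hIH := ih rest' hlen' hshape' (acc ++ [hd] ++ body) false f
          constructor
          · rw [hIH.1]
            simp [pvBLoop, ← hbody, ← hrest', hm]
          · rw [hIH.2]
            simp [pvBLoop, ← hrest', hm]

-- ===== VERDICT (by name: the statement is the Claim_ definition above) =====
theorem replace_chapter_in_book_content_spec : Claim_equal_replace_chapter_in_book_content := by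
  intro book_content chapter_title new_content _
  unfold Spec_replace_chapter_in_book_content
  simp only [replace_chapter_in_book_content, replace_chapter_in_book_content_alt]
  generalize PySem.Chars.splitOn book_content.toList ['\n'] = lines
  generalize PySem.Chars.lower chapter_title.toList = tl
  generalize hnls : PySem.Chars.splitOn new_content.toList ['\n'] = nls
  have hpreall : ∀ l ∈ lines.takeWhile (fun l => !pvIsHeader l), pvIsHeader l = false := by
    intro l hl
    have := List.mem_takeWhile_imp hl
    simpa using this
  have hshape : lines.dropWhile (fun l => !pvIsHeader l) = [] ∨
      ∃ hd t, lines.dropWhile (fun l => !pvIsHeader l) = hd :: t ∧ pvIsHeader hd = true := by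
    cases hr : lines.dropWhile (fun l => !pvIsHeader l) with
    | nil => exact Or.inl rfl
    | cons hd t => exact Or.inr ⟨hd, t, rfl, pvHead_dropWhile lines hd t hr⟩
  have hfold := pvFold_sections tl nls
    (lines.dropWhile (fun l => !pvIsHeader l)).length
    (lines.dropWhile (fun l => !pvIsHeader l)) le_rfl hshape
    (lines.takeWhile (fun l => !pvIsHeader l)) false false
  conv_lhs => rw [← List.takeWhile_append_dropWhile (p := fun l => !pvIsHeader l) (l := lines)]
  rw [List.foldl_append,
    pvFold_nonheader_false tl nls _ hpreall [] false]
  simp only [List.nil_append]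
  rw [hfold.1, hfold.2]
  simp
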